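-- pv_equiv track=rewrite | github.com/tiede/coding-pirates-hoersholm | python/pygame/tetris/tetris_20240610.py | tegnbane
-- ===== SOURCE A (Python) =====
-- def tegnbane(brugteplaceringer = {}):
--     bane = [[(0,0,0) for _ in range(10)] for _ in range(20)]
--     for y in range(len(bane)):
--         for x in range(len(bane[y])):
--             if (x,y) in brugteplaceringer:
--                 farve = brugteplaceringer[(x,y)]
--                 bane[y][x] = farve
--     return bane
-- ===== SOURCE B (Python) =====
-- def tegnbane(brugteplaceringer = {}):
--     bane = [[(0, 0, 0) for _ in range(10)] for _ in range(20)]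
--     for (x, y), farve in brugteplaceringer.items():
--         if 0 <= x < 10 and 0 <= y < 20:
--             bane[y][x] = farve
--     return bane
-- ===== Notes on version B (the rewrite author's own statement) =====
-- stated objective: alternative
-- what changed: Instead of scanning all 200 grid cells and probing the dict for each, B loops once over the dict's items and writes each in-range placement directly into the zero grid.
import Mathlib
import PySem

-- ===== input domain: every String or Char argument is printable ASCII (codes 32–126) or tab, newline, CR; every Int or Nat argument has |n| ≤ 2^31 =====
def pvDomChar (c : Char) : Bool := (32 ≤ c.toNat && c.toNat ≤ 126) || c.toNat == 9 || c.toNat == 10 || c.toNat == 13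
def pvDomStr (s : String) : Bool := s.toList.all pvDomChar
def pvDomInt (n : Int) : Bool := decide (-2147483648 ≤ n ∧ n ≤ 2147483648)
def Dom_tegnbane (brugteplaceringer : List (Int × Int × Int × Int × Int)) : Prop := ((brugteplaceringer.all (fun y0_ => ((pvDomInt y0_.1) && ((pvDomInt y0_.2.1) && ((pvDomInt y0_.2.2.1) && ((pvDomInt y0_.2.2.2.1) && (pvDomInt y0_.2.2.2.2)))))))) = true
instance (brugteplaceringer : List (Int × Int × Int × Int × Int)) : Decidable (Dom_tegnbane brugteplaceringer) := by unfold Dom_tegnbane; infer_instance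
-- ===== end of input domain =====

-- B replaces A's scan of all 200 grid cells (with a dict probe per cell) by a single
-- pass over the placement items, writing each in-range placement into the zero grid (alternative decomposition).


-- ===== PORT A =====
-- first-match association-list lookup = Python dict membership/indexing on the (x, y) key
def pvLookup (l : List (Int × Int × Int × Int × Int)) (x y : Int) : Option (Int × Int × Int) :=
  match l with
  | [] => none
  | (a, b, v) :: t => if a = x ∧ b = y then some v else pvLookup t x y

def tegnbane (brugteplaceringer : List (Int × Int × Int × Int × Int)) : List (List (Int × Int × Int)) :=
  -- bane = [[(0,0,0)]*10 ...]*20 ; then nested loops: for y in range(len(bane)): for x in range(len(bane[y])):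
  let bane : List (List (Int × Int × Int)) := List.replicate 20 (List.replicate 10 ((0 : Int), (0 : Int), (0 : Int)))
  (List.range 20).foldl (fun (bane : List (List (Int × Int × Int))) (y : Nat) =>
    (List.range 10).foldl (fun (bane : List (List (Int × Int × Int))) (x : Nat) =>
      match pvLookup brugteplaceringer (x : Int) (y : Int) with
      | some farve => bane.modify y (fun row => row.set x farve)
      | none => bane) bane) bane

-- ===== PORT B =====
def tegnbane_alt (brugteplaceringer : List (Int × Int × Int × Int × Int)) : List (List (Int × Int × Int)) :=
  let bane : List (List (Int × Int × Int)) := List.replicate 20 (List.replicate 10 ((0 : Int), (0 : Int), (0 : Int)))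
  brugteplaceringer.foldl (fun bane e =>
    let (x, y, farve) := e
    if 0 ≤ x ∧ x < 10 ∧ 0 ≤ y ∧ y < 20 then
      bane.modify y.toNat (fun row => row.set x.toNat farve)
    else bane) bane

-- ===== PRECONDITION & SPEC =====
-- Pre_ excludes association lists with duplicate (x, y) keys, which cannot arise from a Python
-- dict argument; on such lists A's first-match lookup and B's last-write iteration would differ.
def Pre_tegnbane (brugteplaceringer : List (Int × Int × Int × Int × Int)) : Prop :=
  (brugteplaceringer.map (fun e => (e.1, e.2.1))).Nodup
instance (brugteplaceringer : List (Int × Int × Int × Int × Int)) : Decidable (Pre_tegnbane brugteplaceringer) := by unfold Pre_tegnbane; infer_instance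

def pvWitness_tegnbane : (List (Int × Int × Int × Int × Int)) := [(1, 2, 255, 0, 0), (0, 0, 10, 20, 30), (-1, 25, 7, 7, 7)]

def Spec_tegnbane (brugteplaceringer : List (Int × Int × Int × Int × Int)) (out : List (List (Int × Int × Int))) : Prop := out = tegnbane_alt brugteplaceringer
instance (brugteplaceringer : List (Int × Int × Int × Int × Int)) (out : List (List (Int × Int × Int))) : Decidable (Spec_tegnbane brugteplaceringer out) := by unfold Spec_tegnbane; infer_instance

-- ===== CLAIM (what is proved, stated in full; the proofs are below) =====
def Claim_equal_tegnbane : Prop := ∀ (brugteplaceringer : List (Int × Int × Int × Int × Int)), Dom_tegnbane brugteplaceringer → Pre_tegnbane brugteplaceringer → Spec_tegnbane brugteplaceringer (tegnbane brugteplaceringer)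

-- ===== LEMMAS AND PROOFS =====

-- the common normal form: a 20×10 grid given by a cell function
def gridOf (f : Nat → Nat → Int × Int × Int) : List (List (Int × Int × Int)) :=
  List.ofFn (fun y : Fin 20 => List.ofFn (fun x : Fin 10 => f x y))

theorem gridOf_congr {f g : Nat → Nat → Int × Int × Int}
    (h : ∀ x y, x < 10 → y < 20 → f x y = g x y) : gridOf f = gridOf g := by
  unfold gridOf
  congr 1
  funext y
  congr 1
  funext x
  exact h x y x.isLt y.isLt

theorem set_eq_modify_const {α : Type} (l : List α) (i : Nat) (v : α) :
    l.set i v = l.modify i (fun _ => v) := by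
  apply List.ext_getElem
  · simp
  · intro j hj _
    rw [List.getElem_set, List.getElem_modify]

theorem modify_fun_id {α : Type} (l : List α) (i : Nat) :
    l.modify i (fun a => a) = l :=
  List.modify_id i l

theorem gridOf_modify_set (f : Nat → Nat → Int × Int × Int) (a b : Nat) (v : Int × Int × Int)
    (_ha : a < 10) (_hb : b < 20) :
    (gridOf f).modify b (fun row => row.set a v)
      = gridOf (fun x y => if x = a ∧ y = b then v else f x y) := by
  apply List.ext_getElem
  · simp [gridOf]
  · intro y hy hy'
    rw [List.getElem_modify]
    simp only [gridOf, List.getElem_ofFn]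
    by_cases hyb : b = y
    · subst hyb
      rw [if_pos rfl]
      apply List.ext_getElem
      · simp
      · intro x hx hx'
        rw [List.getElem_set]
        simp only [List.getElem_ofFn]
        by_cases hxa : a = x
        · subst hxa
          simp
        · simp [hxa, Ne.symm hxa]
    · rw [if_neg hyb]
      congr 1
      funext x
      rw [if_neg (by exact fun hc => hyb hc.2.symm)]

theorem gridOf_const (c : Int × Int × Int) :
    gridOf (fun _ _ => c) = List.replicate 20 (List.replicate 10 c) := by
  simp [gridOf]

-- a fold of modifies at a fixed index is a single modify with the folded row function
theorem foldl_modify_fixed {α β : Type} (xs : List β) (k : Nat) (s : β → α → α) :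
    ∀ (G : List α),
      xs.foldl (fun g x => g.modify k (s x)) G
        = G.modify k (fun r => xs.foldl (fun r x => s x r) r) := by
  induction xs with
  | nil =>
    intro G
    simp only [List.foldl_nil]
    exact (modify_fun_id G k).symm
  | cons e t ih =>
    intro G
    simp only [List.foldl_cons]
    rw [ih]
    apply List.ext_getElem
    · simp
    · intro j hj _
      rw [List.getElem_modify, List.getElem_modify]
      by_cases h : k = j
      · subst h
        rw [if_pos rfl, if_pos rfl, List.getElem_modify, if_pos rfl]
      · rw [if_neg h, if_neg h, List.getElem_modify, if_neg h]

-- a fold over range n of per-index modifies, as mapIdx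
theorem foldl_range_modify {α : Type} (t : Nat → α → α) :
    ∀ (n : Nat) (G : List α),
      (List.range n).foldl (fun g i => g.modify i (t i)) G
        = G.mapIdx (fun j a => if j < n then t j a else a) := by
  intro n
  induction n with
  | zero =>
    intro G
    simp only [List.range_zero, List.foldl_nil]
    apply List.ext_getElem
    · simp
    · intro j hj _
      simp [List.getElem_mapIdx]
  | succ m ih =>
    intro G
    rw [List.range_succ, List.foldl_append, ih]
    apply List.ext_getElem
    · simp
    · intro j hj hj'
      simp only [List.foldl_cons, List.foldl_nil]
      rw [List.getElem_modify]
      by_cases h : m = j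
      · subst h
        rw [if_pos rfl, List.getElem_mapIdx, List.getElem_mapIdx,
          if_neg (by omega), if_pos (by omega)]
      · rw [if_neg h, List.getElem_mapIdx, List.getElem_mapIdx]
        rcases Nat.lt_or_ge j m with hlt | hge
        · rw [if_pos hlt, if_pos (by omega)]
        · rw [if_neg (by omega), if_neg (by omega)]

-- A's loop body, expressed as a single conditional-free modify
theorem stepA_eq (l : List (Int × Int × Int × Int × Int)) (y : Nat)
    (bane : List (List (Int × Int × Int))) (x : Nat) :
    (match pvLookup l (x : Int) (y : Int) with
     | some farve => bane.modify y (fun row => row.set x farve)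
     | none => bane)
      = bane.modify y (fun row => row.modify x (fun c => (pvLookup l (x : Int) (y : Int)).getD c)) := by
  cases h : pvLookup l (x : Int) (y : Int) with
  | none =>
    simp only [Option.getD_none]
    simp only [modify_fun_id]
  | some v =>
    simp only [Option.getD_some]
    congr 1
    funext row
    exact set_eq_modify_const row x v

-- characterization of port A
set_option maxHeartbeats 1000000 in
theorem tegnbane_char (l : List (Int × Int × Int × Int × Int)) :
    tegnbane l = gridOf (fun x y => (pvLookup l (x : Int) (y : Int)).getD (0, 0, 0)) := by
  unfold tegnbane
  simp only [stepA_eq l]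
  have hinner : ∀ (y : Nat) (bane : List (List (Int × Int × Int))),
      (List.range 10).foldl (fun bane x =>
        bane.modify y (fun row => row.modify x (fun c => (pvLookup l (x : Int) (y : Int)).getD c))) bane
        = bane.modify y (fun row => (List.range 10).foldl (fun r x =>
            r.modify x (fun c => (pvLookup l (x : Int) (y : Int)).getD c)) row) := by
    intro y bane
    exact foldl_modify_fixed (List.range 10) y
      (fun x row => row.modify x (fun c => (pvLookup l (x : Int) (y : Int)).getD c)) bane
  simp only [hinner]
  rw [foldl_range_modify]
  apply List.ext_getElem
  · simp [gridOf]
  · intro y hy hy'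
    have hy20 : y < 20 := by simpa using hy
    rw [List.getElem_mapIdx, List.getElem_replicate, if_pos hy20]
    rw [foldl_range_modify]
    simp only [gridOf, List.getElem_ofFn]
    apply List.ext_getElem
    · simp
    · intro x hx hx'
      have hx10 : x < 10 := by simpa using hx
      rw [List.getElem_mapIdx, List.getElem_replicate, if_pos hx10, List.getElem_ofFn]

-- lookup misses when the key is absent
theorem pvLookup_eq_none (l : List (Int × Int × Int × Int × Int)) (x y : Int)
    (h : (x, y) ∉ l.map (fun e => (e.1, e.2.1))) : pvLookup l x y = none := by
  induction l with
  | nil => rfl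
  | cons e t ih =>
    obtain ⟨a, b, v⟩ := e
    simp only [List.map_cons, List.mem_cons, not_or] at h
    simp only [pvLookup]
    rw [if_neg, ih h.2]
    rintro ⟨rfl, rfl⟩
    exact h.1 rfl

-- characterization of port B's fold, started from any gridOf
theorem alt_fold_char (l : List (Int × Int × Int × Int × Int))
    (hl : (l.map (fun e => (e.1, e.2.1))).Nodup) :
    ∀ (f : Nat → Nat → Int × Int × Int),
      l.foldl (fun bane e =>
          let (x, y, farve) := e
          if 0 ≤ x ∧ x < 10 ∧ 0 ≤ y ∧ y < 20 then
            bane.modify y.toNat (fun row => row.set x.toNat farve)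
          else bane) (gridOf f)
        = gridOf (fun x y => (pvLookup l (x : Int) (y : Int)).getD (f x y)) := by
  induction l with
  | nil =>
    intro f
    simp [pvLookup]
  | cons e t ih =>
    obtain ⟨x0, y0, v⟩ := e
    rw [List.map_cons, List.nodup_cons] at hl
    intro f
    simp only [List.foldl_cons]
    by_cases hr : 0 ≤ x0 ∧ x0 < 10 ∧ 0 ≤ y0 ∧ y0 < 20
    · rw [if_pos hr]
      have hx : x0.toNat < 10 := by omega
      have hy : y0.toNat < 20 := by omega
      rw [gridOf_modify_set f x0.toNat y0.toNat v hx hy, ih hl.2]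
      apply gridOf_congr
      intro x y hx10 hy20
      by_cases hkey : x0 = (x : Int) ∧ y0 = (y : Int)
      · obtain ⟨hk1, hk2⟩ := hkey
        have hxx : x = x0.toNat := by omega
        have hyy : y = y0.toNat := by omega
        have hnone : pvLookup t (x : Int) (y : Int) = none := by
          apply pvLookup_eq_none
          rw [← hk1, ← hk2]
          exact hl.1
        have hc1 : x0 = (x : Int) ∧ y0 = (y : Int) := ⟨hk1, hk2⟩
        have hc2 : x = x0.toNat ∧ y = y0.toNat := ⟨hxx, hyy⟩
        simp only [pvLookup]
        rw [if_pos hc1, Option.getD_some, if_pos hc2, hnone, Option.getD_none]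
      · have hne : ¬ (x = x0.toNat ∧ y = y0.toNat) := by
          rintro ⟨rfl, rfl⟩
          exact hkey ⟨by omega, by omega⟩
        simp only [pvLookup, if_neg hkey, if_neg hne]
    · rw [if_neg hr, ih hl.2]
      apply gridOf_congr
      intro x y hx10 hy20
      have hkey : ¬ (x0 = (x : Int) ∧ y0 = (y : Int)) := by
        rintro ⟨rfl, rfl⟩
        exact hr ⟨by omega, by omega, by omega, by omega⟩
      simp only [pvLookup, if_neg hkey]

theorem tegnbane_alt_char (l : List (Int × Int × Int × Int × Int))
    (hl : (l.map (fun e => (e.1, e.2.1))).Nodup) :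
    tegnbane_alt l = gridOf (fun x y => (pvLookup l (x : Int) (y : Int)).getD (0, 0, 0)) := by
  unfold tegnbane_alt
  rw [← gridOf_const (0, 0, 0)]
  exact alt_fold_char l hl (fun _ _ => (0, 0, 0))

-- ===== VERDICT (by name: the statement is the Claim_ definition above) =====
theorem tegnbane_spec : Claim_equal_tegnbane := by
  intro l _ hpre
  unfold Spec_tegnbane
  rw [tegnbane_char l, tegnbane_alt_char l hpre]
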